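-- pv_equiv track=rewrite | github.com/RTWeiss/find | crawl.py | domain
-- ===== SOURCE A (Python) =====
-- def domain(url):
--     subs = url[7:url.find('/', 8)]
--     subs = subs.split('.')
--     ret = subs[0]
--     for x in range(len(subs)):
--         if len(subs[-x]) > 3:
--             ret = subs[-x]
--     while subs[0] != ret:
--         subs.pop(0)
--     return subs[0], 'http://'+'.'.join(subs) + url[url.find('/', 8):]
-- ===== SOURCE B (Python) =====
-- def domain(url):
--     start = url.find('/', 8)
--     labels = url[7:start].split('.')
--     ret = next((lab for lab in labels[1:] if len(lab) > 3), labels[0])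
--     idx = labels.index(ret)
--     return ret, 'http://' + '.'.join(labels[idx:]) + url[start:]
-- ===== Notes on version B (the rewrite author's own statement) =====
-- stated objective: simpler
-- what changed: A scans the labels backwards with negative indices (last assignment wins) and trims by repeatedly popping the head in a while loop; B picks the first label after the first with length > 3 via a forward first-match scan and trims with a single .index plus a slice, with no mutation.
import Mathlib
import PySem

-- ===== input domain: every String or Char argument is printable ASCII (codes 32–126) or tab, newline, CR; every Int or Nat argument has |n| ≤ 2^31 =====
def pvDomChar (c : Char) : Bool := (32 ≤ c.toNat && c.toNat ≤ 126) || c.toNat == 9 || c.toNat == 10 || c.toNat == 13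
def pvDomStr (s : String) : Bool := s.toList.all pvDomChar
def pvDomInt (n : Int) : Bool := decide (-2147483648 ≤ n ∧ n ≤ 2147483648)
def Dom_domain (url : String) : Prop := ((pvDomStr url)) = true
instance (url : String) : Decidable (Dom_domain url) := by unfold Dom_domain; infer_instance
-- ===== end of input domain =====

-- B replaces A's backward negative-index scan and mutating while/pop trim by a
-- forward first-match selection plus an index?/slice trim (objective: simpler).

-- ===== PORT A =====
-- A's 'for x in range(len(subs)): if len(subs[-x]) > 3: ret = subs[-x]'
-- (subs[-x] is always in range here, so pyGetD with a dummy default is exact)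
def domainSelect (subs : List String) (r0 : String) : String :=
  (PySem.List.pyRange 0 (subs.length : Int) 1).foldl
    (fun r x => if 3 < PySem.Str.len (PySem.List.pyGetD subs (-x) "") then PySem.List.pyGetD subs (-x) "" else r) r0

-- A's 'while subs[0] != ret: subs.pop(0)' (the [] case is a totality guard;
-- Python never reaches it because ret is always an element of subs)
def domainTrim (ret : String) : List String → List String
  | [] => []
  | h :: t => if h = ret then h :: t else domainTrim ret t

def domain (url : String) : String × String :=
  let subs0 := (PySem.Str.split? (PySem.Str.slice url (some 7) (some (PySem.Str.findFrom url "/" 8))) ".").getD []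
  let ret := domainSelect subs0 (PySem.List.pyGetD subs0 0 "")
  let subs := domainTrim ret subs0
  (PySem.List.pyGetD subs 0 "",
   "http://" ++ PySem.Str.join "." subs ++ PySem.Str.slice url (some (PySem.Str.findFrom url "/" 8)) none)

-- ===== PORT B =====
-- B's 'next((lab for lab in labels[1:] if len(lab) > 3), labels[0])'
def domainPick (dflt : String) : List String → String
  | [] => dflt
  | l :: t => if 3 < PySem.Str.len l then l else domainPick dflt t

def domain_alt (url : String) : String × String :=
  let start := PySem.Str.findFrom url "/" 8
  let labels := (PySem.Str.split? (PySem.Str.slice url (some 7) (some start)) ".").getD []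
  let ret := domainPick (PySem.List.pyGetD labels 0 "") (PySem.List.slice labels (some 1) none)
  let idx := (PySem.List.index? labels ret).getD 0
  (ret,
   "http://" ++ PySem.Str.join "." (PySem.List.slice labels (some (idx : Int)) none) ++ PySem.Str.slice url (some start) none)

-- ===== PRECONDITION & SPEC =====
def Spec_domain (url : String) (out : String × String) : Prop := out = domain_alt url
instance (url : String) (out : String × String) : Decidable (Spec_domain url out) := by unfold Spec_domain; infer_instance

-- ===== CLAIM (what is proved, stated in full; the proofs are below) =====
def Claim_equal_domain : Prop := ∀ (url : String), Dom_domain url → Spec_domain url (domain url)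

-- ===== LEMMAS AND PROOFS =====

-- the indices A's loop visits pick out the labels in the order h, t.reverse
theorem pv_map_negIdx (h : String) (t : List String) :
    (PySem.List.pyRange 0 (((h :: t).length : Nat) : Int) 1).map
      (fun x => PySem.List.pyGetD (h :: t) (-x) "") = h :: t.reverse := by
  rw [PySem.List.pyRange_zero_natCast, List.map_map]
  apply List.ext_getElem
  · simp
  · intro j hj hj'
    simp only [List.getElem_map, List.getElem_range, Function.comp_apply]
    cases j with
    | zero => simp [PySem.List.pyGetD_zero_cons]
    | succ k =>
      have hk : k < t.length := by simpa using hj'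
      have hlen : k + 1 ≤ (h :: t).length := by simp; omega
      rw [PySem.List.pyGetD_neg_natCast (h :: t) (k + 1) "" (Nat.succ_pos k) hlen,
        List.getElem_cons_succ, List.getElem_reverse]
      have hidx : (h :: t).length - (k + 1) = (t.length - 1 - k) + 1 := by simp; omega
      rw [getElem_congr rfl hidx (by simp), List.getElem_cons_succ]

-- A's foldr-shape of the scan is exactly B's first-match recursion
theorem pv_foldr_pick (dflt : String) (t : List String) :
    t.foldr (fun s r => if 3 < PySem.Str.len s then s else r) dflt = domainPick dflt t := by
  induction t with
  | nil => rfl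
  | cons s t ih => simp only [List.foldr_cons, domainPick, ih]

-- the selection loops agree
theorem pv_select_eq (L : List String) :
    domainSelect L (PySem.List.pyGetD L 0 "") =
      domainPick (PySem.List.pyGetD L 0 "") (PySem.List.slice L (some 1) none) := by
  cases L with
  | nil => rfl
  | cons h t =>
    unfold domainSelect
    rw [PySem.List.slice_from_one]
    have hmap := pv_map_negIdx h t
    calc (PySem.List.pyRange 0 (((h :: t).length : Nat) : Int) 1).foldl
            (fun r x => if 3 < PySem.Str.len (PySem.List.pyGetD (h :: t) (-x) "") then PySem.List.pyGetD (h :: t) (-x) "" else r)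
            (PySem.List.pyGetD (h :: t) 0 "")
        = (h :: t.reverse).foldl (fun r s => if 3 < PySem.Str.len s then s else r)
            (PySem.List.pyGetD (h :: t) 0 "") := by
          rw [← hmap, List.foldl_map]
      _ = t.reverse.foldl (fun r s => if 3 < PySem.Str.len s then s else r) h := by
          simp [PySem.List.pyGetD_zero_cons]
      _ = t.foldr (fun s r => if 3 < PySem.Str.len s then s else r) h := List.foldl_reverse
      _ = domainPick (PySem.List.pyGetD (h :: t) 0 "") t := by
          rw [pv_foldr_pick, PySem.List.pyGetD_zero_cons]

-- B's chosen label is always one of the labels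
theorem pv_pick_mem (h : String) (t : List String) : domainPick h t ∈ h :: t := by
  induction t with
  | nil => simp [domainPick]
  | cons s t ih =>
    unfold domainPick
    split
    · simp
    · rcases List.mem_cons.mp ih with h1 | h1
      · simp [h1]
      · simp [h1]

-- the while/pop trim is the drop at the first value occurrence
theorem pv_trim_eq (ret : String) (L : List String) (hm : ret ∈ L) :
    domainTrim ret L = L.drop ((PySem.List.index? L ret).getD 0) := by
  induction L with
  | nil => cases hm
  | cons h t ih =>
    unfold domainTrim
    by_cases he : h = ret
    · subst he
      rw [PySem.List.index?_cons_self]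
      simp
    · rw [if_neg he, PySem.List.index?_cons_of_ne t he]
      have hmt : ret ∈ t := by
        rcases List.mem_cons.mp hm with h1 | h1
        · exact absurd h1.symm he
        · exact h1
      obtain ⟨k, hk⟩ : ∃ k, PySem.List.index? t ret = some k := by
        cases hidx : PySem.List.index? t ret with
        | none => exact absurd (List.idxOf?_eq_none_iff.mp hidx) (by simp [hmt])
        | some k => exact ⟨k, rfl⟩
      rw [ih hmt, hk]
      simp

-- the trimmed list starts with ret
theorem pv_trim_head (ret : String) (L : List String) (hm : ret ∈ L) :
    PySem.List.pyGetD (domainTrim ret L) 0 "" = ret := by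
  induction L with
  | nil => cases hm
  | cons h t ih =>
    unfold domainTrim
    by_cases he : h = ret
    · rw [if_pos he, PySem.List.pyGetD_zero_cons]; exact he
    · rw [if_neg he]
      exact ih (by rcases List.mem_cons.mp hm with h1 | h1; exact absurd h1.symm he; exact h1)

-- ===== VERDICT (by name: the statement is the Claim_ definition above) =====
theorem domain_spec : Claim_equal_domain := by
  intro url _
  unfold Spec_domain
  simp only [domain, domain_alt]
  generalize (PySem.Str.split? (PySem.Str.slice url (some 7) (some (PySem.Str.findFrom url "/" 8))) ".").getD [] = L
  rw [pv_select_eq L]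
  generalize hret : domainPick (PySem.List.pyGetD L 0 "") (PySem.List.slice L (some 1) none) = ret
  cases L with
  | nil =>
    subst hret
    simp [domainTrim, domainPick, PySem.List.pyGetD,
      PySem.List.index?, PySem.List.slice]
  | cons h t =>
    have hmem : ret ∈ h :: t := by
      rw [← hret, PySem.List.slice_from_one]
      simpa using pv_pick_mem h t
    obtain ⟨k, hk⟩ : ∃ k, PySem.List.index? (h :: t) ret = some k := by
      cases hidx : PySem.List.index? (h :: t) ret with
      | none => exact absurd (List.idxOf?_eq_none_iff.mp hidx) (by simp [hmem])
      | some k => exact ⟨k, rfl⟩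
    rw [pv_trim_head ret (h :: t) hmem, pv_trim_eq ret (h :: t) hmem, hk]
    simp only [Option.getD_some]
    rw [PySem.List.slice_from_natCast]
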